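-- pv_equiv track=rewrite | github.com/smrg-lm/sc3 | sc3/base/utils.py | flop
-- ===== SOURCE A (Python) =====
-- def as_list(obj):
--     '''
--     Bubble non iterable objects, tuples and strings in a list. If obj is None
--     returns an empty list. For the rest of iterators is the same as list(obj).
--     '''
--     if isinstance(obj, (tuple, str)):
--         return [obj]
--     elif hasattr(obj, '__iter__'):
--         return list(obj)
--     else:
--         return [obj]
--
-- def flop(lst):
--     lst = [[None] if x is None else as_list(x) for x in lst]  # NOTE: as_list converts None in []
--     n = len(lst)
--     if n == 0:
--         return [[]]  # NOTE: empty column as in sclang.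
--     length = max(len(l) for l in lst)
--     ret = [[None for _ in range(n)] for _ in range(length)]
--     for i in range(length):
--         for j in range(n):
--             try:
--                 ret[i][j] = lst[j][i % len(lst[j])]  # NOTE: i % 0 == 0 in sclang, and is also empty list.
--             except ZeroDivisionError:
--                 ret[i][j] = []  # NOTE: a = []; a[0] is nil, 0 or nil is [].
--     return ret
-- ===== SOURCE B (Python) =====
-- def _as_list(obj):
--     if obj is None:
--         return [None]
--     if isinstance(obj, (tuple, str)):
--         return [obj]
--     if hasattr(obj, '__iter__'):
--         return list(obj)
--     return [obj]
--
-- def flop(lst):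
--     cols = [_as_list(x) for x in lst]
--     if not cols:
--         return [[]]
--     length = max(len(c) for c in cols)
--     wrapped = [(c * (length // len(c) + 1))[:length] if c else [[]] * length
--                for c in cols]
--     return [list(row) for row in zip(*wrapped)]
-- ===== Notes on version B (the rewrite author's own statement) =====
-- stated objective: faster
-- what changed: B builds each wrapped column at once by list repetition+truncation and transposes with zip (C-level bulk operations) instead of A's per-cell modular indexing with try/except into a preallocated table.
-- outside the precondition, e.g. on flop([[1], []]): A returns [[1, []]], B returns [[1, []]]
import Mathlib
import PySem

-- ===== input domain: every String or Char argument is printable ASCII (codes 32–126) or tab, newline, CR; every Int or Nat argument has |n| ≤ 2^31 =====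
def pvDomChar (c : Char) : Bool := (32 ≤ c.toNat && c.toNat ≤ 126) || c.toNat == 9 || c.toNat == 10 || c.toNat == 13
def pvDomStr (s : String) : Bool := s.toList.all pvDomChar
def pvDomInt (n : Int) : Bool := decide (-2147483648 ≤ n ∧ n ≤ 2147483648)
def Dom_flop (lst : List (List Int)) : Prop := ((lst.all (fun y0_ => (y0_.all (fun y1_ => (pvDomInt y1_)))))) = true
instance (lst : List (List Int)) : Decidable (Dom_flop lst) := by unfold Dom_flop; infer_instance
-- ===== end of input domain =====

-- B transposes with repetition-truncated columns instead of A's per-cell modular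
-- indexing into a preallocated table (objective: faster by constant factor — bulk repetition+zip vs per-cell indexing).

-- ===== PORT A =====
-- On List (List Int) inputs, A's `[None] if x is None else as_list(x)` preprocessing
-- is the identity (every element is already a list, never None), so it is omitted.
def flop (lst : List (List Int)) : List (List Int) :=
  let n := lst.length
  if n = 0 then [[]]
  else
    -- max(len(l) for l in lst): fold of max over the lengths (all ≥ 0, n > 0)
    let len := ((lst.map List.length).foldl Nat.max 0)
    -- ret[i][j] = lst[j][i % len(lst[j])]; on the ZeroDivisionError branch A stores
    -- the empty LIST as the cell, which leaves the declared type — Pre_flop excludes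
    -- those inputs, so the total-form default 0 below is never reached under Pre_.
    (List.range len).map (fun i =>
      lst.map (fun l => PySem.List.pyGetD l ((i % l.length : Nat) : Int) 0))

-- ===== PORT B =====
-- termination measure for zipT: tails strictly shrink the total length
theorem zipT_dec (cols : List (List Int)) (h0 : cols ≠ []) (h1 : ∀ c ∈ cols, c ≠ []) :
    ((cols.map List.tail).map List.length).sum < (cols.map List.length).sum := by
  induction cols with
  | nil => exact absurd rfl h0
  | cons c rest ih =>
    have hc : c.tail.length < c.length := by
      cases c with
      | nil => exact absurd rfl (h1 [] (by simp))
      | cons a t => simp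
    cases rest with
    | nil => simpa using hc
    | cons d r =>
      have := ih (by simp) (fun x hx => h1 x (List.mem_cons_of_mem _ hx))
      simp only [List.map_cons, List.sum_cons] at this ⊢
      omega

-- zip(*cols): emit the heads, recurse on the tails, stop when a column runs out
def zipT (cols : List (List Int)) : List (List Int) :=
  if h : cols = [] ∨ cols.any (·.isEmpty) then []
  else (cols.map (fun c => c.headD 0)) :: zipT (cols.map List.tail)
termination_by ((cols.map List.length).sum)
decreasing_by
  simpa using zipT_dec cols (fun hc => h (Or.inl hc))
    (fun c hc => by
      intro he
      exact h (Or.inr (List.any_eq_true.mpr ⟨c, hc, by simp [he]⟩)))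

def flop_alt (lst : List (List Int)) : List (List Int) :=
  -- B's _as_list preprocessing is likewise the identity on List (List Int)
  let cols := lst
  if cols = [] then [[]]
  else
    let len := ((cols.map List.length).foldl Nat.max 0)
    -- (c * (len // |c| + 1))[:len] if c else [[]]*len — the empty-column value's
    -- cells are empty LISTS in Python (outside Pre_flop; under Pre_flop an empty c
    -- only occurs with len = 0, where both forms are []).
    let wrapped := cols.map (fun c =>
      if c = [] then List.replicate len 0
      else ((List.replicate (len / c.length + 1) c).flatten).take len)
    zipT wrapped

-- ===== PRECONDITION & SPEC =====
-- Pre_ excludes inputs mixing an empty and a non-empty sublist: there A (and Python B)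
-- put the empty LIST into cells of the result, which is not a value of the declared
-- List[List[int]] type.
def Pre_flop (lst : List (List Int)) : Prop :=
  (∀ x ∈ lst, x ≠ []) ∨ (∀ x ∈ lst, x = [])
instance (lst : List (List Int)) : Decidable (Pre_flop lst) := by
  unfold Pre_flop; infer_instance

def pvWitness_flop : List (List Int) := [[1, 2], [3]]

def Spec_flop (lst : List (List Int)) (out : List (List Int)) : Prop := out = flop_alt lst
instance (lst : List (List Int)) (out : List (List Int)) : Decidable (Spec_flop lst out) := by unfold Spec_flop; infer_instance

-- ===== CLAIM (what is proved, stated in full; the proofs are below) =====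
def Claim_equal_flop : Prop := ∀ (lst : List (List Int)), Dom_flop lst → Pre_flop lst → Spec_flop lst (flop lst)

-- ===== LEMMAS AND PROOFS =====

-- zipT on columns of one uniform length is the index-by-index transpose
theorem zipT_uniform (L : Nat) :
    ∀ (cols : List (List Int)), cols ≠ [] → (∀ c ∈ cols, c.length = L) →
      zipT cols = (List.range L).map (fun i => cols.map (fun c => c.getD i 0)) := by
  induction L with
  | zero =>
    intro cols h0 h1
    rw [zipT.eq_def]
    have : cols.any (·.isEmpty) = true := by
      cases cols with
      | nil => exact absurd rfl h0
      | cons c rest =>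
        have : c = [] := List.eq_nil_of_length_eq_zero (h1 c (by simp))
        simp [this]
    simp [this]
  | succ n ih =>
    intro cols h0 h1
    have hne : ∀ c ∈ cols, c ≠ [] := by
      intro c hc he
      have := h1 c hc
      simp [he] at this
    rw [zipT.eq_def]
    have hguard : ¬ (cols = [] ∨ cols.any (·.isEmpty) = true) := by
      rintro (hc | hc)
      · exact h0 hc
      · obtain ⟨c, hc1, hc2⟩ := List.any_eq_true.mp hc
        exact hne c hc1 (List.isEmpty_iff.mp (by simpa using hc2))
    rw [dif_neg hguard]
    have htails : (cols.map List.tail) ≠ [] := by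
      cases cols with
      | nil => exact absurd rfl h0
      | cons _ _ => simp
    have htlen : ∀ t ∈ cols.map List.tail, t.length = n := by
      intro t ht
      obtain ⟨c, hc, rfl⟩ := List.mem_map.mp ht
      have := h1 c hc
      cases c with
      | nil => exact absurd rfl (hne [] hc)
      | cons a s => simpa using this
    rw [ih (cols.map List.tail) htails htlen]
    rw [List.range_succ_eq_map]
    simp only [List.map_cons, List.map_map]
    congr 1
    · apply List.map_congr_left
      intro c hc
      cases c with
      | nil => exact absurd rfl (hne [] hc)
      | cons a s => simp
    · apply List.map_congr_left
      intro i _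
      apply List.map_congr_left
      intro c hc
      cases c with
      | nil => exact absurd rfl (hne [] hc)
      | cons a s => simp [Function.comp]

-- indexing a k-fold repetition of c is modular indexing into c
theorem getD_flatten_replicate (c : List Int) (hc : c ≠ []) :
    ∀ (k i : Nat), i < k * c.length →
      ((List.replicate k c).flatten).getD i 0 = c.getD (i % c.length) 0 := by
  intro k
  induction k with
  | zero => intro i hi; omega
  | succ m ih =>
    intro i hi
    rw [List.replicate_succ, List.flatten_cons]
    rw [Nat.succ_mul] at hi
    by_cases h : i < c.length
    · rw [List.getD_append _ _ _ _ h, Nat.mod_eq_of_lt h]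
    · rw [Nat.not_lt] at h
      have hlen : 0 < c.length := List.length_pos_iff.mpr hc
      rw [List.getD_append_right _ _ _ _ h]
      rw [ih (i - c.length) (by omega)]
      rw [Nat.mod_eq_sub_mod h]

theorem lt_div_succ_mul (L b : Nat) (hb : 0 < b) : L < (L / b + 1) * b := by
  rw [Nat.add_mul, one_mul]
  have h1 := Nat.mod_add_div' L b
  have h2 := Nat.mod_lt L hb
  omega

theorem foldl_max_zero_of_all_zero :
    ∀ (l : List Nat), (∀ x ∈ l, x = 0) → l.foldl Nat.max 0 = 0 := by
  intro l h
  induction l with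
  | nil => rfl
  | cons a t ih =>
    have := h a (by simp)
    subst this
    simpa using ih (fun x hx => h x (by simp [hx]))

-- ===== VERDICT (by name: the statement is the Claim_ definition above) =====
theorem flop_spec : Claim_equal_flop := by
  intro lst _ hpre
  unfold Spec_flop flop flop_alt
  cases lst with
  | nil => rfl
  | cons c0 rest =>
    simp only [List.length_cons, Nat.succ_ne_zero, ite_false, reduceCtorEq]
    set cols := c0 :: rest with hcols
    set L := ((cols.map List.length).foldl Nat.max 0) with hL
    set wrapped := cols.map (fun c =>
      if c = [] then List.replicate L 0
      else ((List.replicate (L / c.length + 1) c).flatten).take L) with hw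
    have hwlen : ∀ w ∈ wrapped, w.length = L := by
      intro w hwmem
      obtain ⟨c, hc, rfl⟩ := List.mem_map.mp hwmem
      by_cases he : c = []
      · simp [he]
      · have hlen : 0 < c.length := List.length_pos_iff.mpr he
        have : L ≤ (L / c.length + 1) * c.length :=
          Nat.le_of_lt (lt_div_succ_mul L c.length hlen)
        simp only [if_neg he, List.length_take, List.length_flatten]
        simp [List.map_replicate, List.sum_replicate]
        omega
    have hwne : wrapped ≠ [] := by simp [hw, hcols]
    rw [zipT_uniform L wrapped hwne hwlen]
    apply List.map_congr_left
    intro i hi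
    have hiL : i < L := List.mem_range.mp hi
    rw [hw, List.map_map]
    apply List.map_congr_left
    intro c hc
    simp only [Function.comp]
    by_cases he : c = []
    · -- excluded by Pre_ unless every sublist is empty; then L = 0 contradicts i < L
      exfalso
      rcases hpre with hall | hall
      · exact hall c hc he
      · have : L = 0 := by
          apply foldl_max_zero_of_all_zero
          intro x hx
          obtain ⟨y, hy, rfl⟩ := List.mem_map.mp hx
          simp [hall y hy]
        omega
    · have hlen : 0 < c.length := List.length_pos_iff.mpr he
      rw [if_neg he]
      have hflat : ((List.replicate (L / c.length + 1) c).flatten).getD i 0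
          = c.getD (i % c.length) 0 := by
        apply getD_flatten_replicate c he
        exact Nat.lt_of_lt_of_le hiL (Nat.le_of_lt (lt_div_succ_mul L c.length hlen))
      simp only [List.getD_eq_getElem?_getD, List.getElem?_take_of_lt hiL] at hflat ⊢
      rw [hflat, PySem.List.pyGetD_natCast, List.getD_eq_getElem?_getD]
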